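-- pv_equiv track=rewrite | github.com/bilal-jaiel/TilingSolver | 2D_tilings/All_tilings/2D_All_tilings_linear_system_connexity_check.py | connexity_check
-- ===== SOURCE A (Python) =====
-- def connexity_check(B, autres_pièces, aires_autres_pieces):
--     rows = len(B)
--     cols = len(B[0])
--     visite = [[False] * cols for _ in range(rows)]
--     minimum = min(aires_autres_pieces)
--
--     def rec(x, y):
--         """Explore récursivement tous les 0 connectés et compte leur aire."""
--         if x < 0 or y < 0 or x >= rows or y >= cols or B[x][y] == 1 or visite[x][y]:
--             return 0
--         visite[x][y] = True
--         return 1 + rec(x + 1, y) + rec(x - 1, y) + rec(x, y + 1) + rec(x, y - 1)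
--
--     count = 0
--     for i in range(rows):
--         for j in range(cols):
--             if B[i][j] == 0 and not visite[i][j]:
--                 count += 1
--                 if count > len(autres_pièces):
--                     return False  # On arrête immédiatement
--                 area = rec(i, j)  # Ajouter l'aire de cette zone
--                 if area < minimum :
--                     return False
--
--     return True  # Retourne la connectivité + l'aire totale des 0
-- ===== SOURCE B (Python) =====
-- def connexity_check(B, autres_pièces, aires_autres_pieces):
--     rows = len(B)
--     cols = len(B[0])
--     visite = [[False] * cols for _ in range(rows)]
--     minimum = min(aires_autres_pieces)
--
--     def fill(sx, sy):
--         """Iterative flood fill with an explicit stack; returns the area."""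
--         area = 0
--         stack = [(sx, sy)]
--         while stack:
--             x, y = stack.pop()
--             if x < 0 or y < 0 or x >= rows or y >= cols or B[x][y] == 1 or visite[x][y]:
--                 continue
--             visite[x][y] = True
--             area += 1
--             stack.append((x, y - 1))
--             stack.append((x, y + 1))
--             stack.append((x - 1, y))
--             stack.append((x + 1, y))
--         return area
--
--     count = 0
--     for i in range(rows):
--         for j in range(cols):
--             if B[i][j] == 0 and not visite[i][j]:
--                 count += 1
--                 if count > len(autres_pièces):
--                     return False
--                 area = fill(i, j)
--                 if area < minimum:
--                     return False
--
--     return True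
-- ===== Notes on version B (the rewrite author's own statement) =====
-- stated objective: alternative
-- what changed: The recursive depth-first rec(x,y) flood fill is replaced by an iterative flood fill driven by an explicit stack of cells (pop, test, mark, push the four neighbours), with the same visited matrix and outer scan.
-- outside the precondition, e.g. on connexity_check([[0, 0], [0]], [], [1]): A returns False, B returns False
import Mathlib
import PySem

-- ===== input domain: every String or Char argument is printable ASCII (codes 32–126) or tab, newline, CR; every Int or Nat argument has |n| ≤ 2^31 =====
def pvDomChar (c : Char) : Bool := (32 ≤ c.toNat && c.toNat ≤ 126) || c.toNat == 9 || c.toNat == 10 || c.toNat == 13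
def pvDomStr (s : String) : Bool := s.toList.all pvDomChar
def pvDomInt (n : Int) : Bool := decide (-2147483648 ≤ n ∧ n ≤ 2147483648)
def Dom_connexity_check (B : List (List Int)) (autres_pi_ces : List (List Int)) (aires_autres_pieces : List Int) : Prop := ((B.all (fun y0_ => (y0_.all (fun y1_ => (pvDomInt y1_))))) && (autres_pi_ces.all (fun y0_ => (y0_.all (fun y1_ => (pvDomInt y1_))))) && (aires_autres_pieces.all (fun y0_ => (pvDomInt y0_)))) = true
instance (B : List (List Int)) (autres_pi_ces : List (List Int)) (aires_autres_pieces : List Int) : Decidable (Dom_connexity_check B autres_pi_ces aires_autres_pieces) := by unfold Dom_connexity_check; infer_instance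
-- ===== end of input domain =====

-- B replaces A's recursive flood fill by an iterative one with an explicit stack (alternative
-- decomposition, same cost); same outer scan, same visited matrix, same return value.

-- Shared low-level helpers (grid access and the visited matrix), used by both ports.

-- B[x][y] (only evaluated after the 0 ≤ x < rows, 0 ≤ y < cols guard; exact there under Pre_)
def cellB (B : List (List Int)) (x y : Int) : Int :=
  (B.getD x.toNat []).getD y.toNat 0

-- visite[x][y] (default true outside the matrix; only evaluated in range during execution)
def getV (v : List (List Bool)) (x y : Int) : Bool :=
  (v.getD x.toNat []).getD y.toNat true

-- set a row entry to true
def setRow : List Bool → Nat → List Bool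
  | [], _ => []
  | _ :: t, 0 => true :: t
  | b :: t, n + 1 => b :: setRow t n

-- visite[x][y] = True
def setV (v : List (List Bool)) (x y : Int) : List (List Bool) :=
  match v, x.toNat with
  | [], _ => []
  | r :: t, 0 => setRow r y.toNat :: t
  | r :: t, n + 1 => r :: setV2 t n y.toNat
where
  setV2 : List (List Bool) → Nat → Nat → List (List Bool)
  | [], _, _ => []
  | r :: t, 0, y => setRow r y :: t
  | r :: t, n + 1, y => r :: setV2 t n y

-- number of unvisited entries (termination measure)
def unvis (v : List (List Bool)) : Nat := (v.map (fun r => r.count false)).sum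

theorem setRow_count_lt (r : List Bool) (y : Nat) (h : r.getD y true = false) :
    (setRow r y).count false < r.count false := by
  induction r generalizing y with
  | nil => simp [List.getD] at h
  | cons b t ih =>
    cases y with
    | zero =>
      simp [List.getD] at h
      subst h
      simp [setRow]
    | succ n =>
      simp [List.getD] at h ⊢
      have := ih n (by simpa [List.getD] using h)
      simp [setRow, List.count_cons]
      omega

theorem setV2_lt (v : List (List Bool)) (x y : Nat)
    (h : (v.getD x []).getD y true = false) :
    unvis (setV.setV2 v x y) < unvis v := by
  induction v generalizing x with
  | nil => simp [List.getD] at h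
  | cons r t ih =>
    cases x with
    | zero =>
      have := setRow_count_lt r y (by simpa [List.getD] using h)
      simp [setV.setV2, unvis]
      omega
    | succ n =>
      have := ih n (by simpa [List.getD] using h)
      simp [setV.setV2, unvis] at this ⊢
      omega

theorem setV_eq_setV2 (v : List (List Bool)) (x y : Int) :
    setV v x y = setV.setV2 v x.toNat y.toNat := by
  cases v with
  | nil => simp [setV, setV.setV2]
  | cons r t =>
    cases h : x.toNat with
    | zero => simp [setV, h, setV.setV2]
    | succ n => simp [setV, h, setV.setV2]

theorem setV_lt (v : List (List Bool)) (x y : Int) (h : getV v x y = false) :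
    unvis (setV v x y) < unvis v := by
  rw [setV_eq_setV2]
  exact setV2_lt v x.toNat y.toNat (by simpa [getV] using h)

-- ===== PORT A =====

-- rec(x,y): recursive flood fill.  The recursion is totalised with a fuel argument that
-- strictly exceeds the number of unvisited cells (Python recursion marks one cell per level
-- of unvisited depth, so this fuel is never exhausted); otherwise a literal transliteration.
def recF (B : List (List Int)) (rows cols : Int) : Nat → Int → Int → List (List Bool) → Int × List (List Bool)
  | 0, _, _, v => (0, v)
  | n + 1, x, y, v =>
    if x < 0 ∨ y < 0 ∨ rows ≤ x ∨ cols ≤ y ∨ cellB B x y = 1 ∨ getV v x y = true then (0, v)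
    else
      let p1 := recF B rows cols n (x + 1) y (setV v x y)
      let p2 := recF B rows cols n (x - 1) y p1.2
      let p3 := recF B rows cols n x (y + 1) p2.2
      let p4 := recF B rows cols n x (y - 1) p3.2
      (1 + p1.1 + p2.1 + p3.1 + p4.1, p4.2)

def recA (B : List (List Int)) (rows cols : Int) (x y : Int) (v : List (List Bool)) :
    Int × List (List Bool) :=
  recF B rows cols (unvis v + 1) x y v

-- inner 'for j in range(cols)' of A; none = an early 'return False'
def loopJA (B : List (List Int)) (rows cols minimum limit : Int) (i : Int) :
    List Int → Int → List (List Bool) → Option (Int × List (List Bool))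
  | [], count, v => some (count, v)
  | j :: rest, count, v =>
    if cellB B i j = 0 ∧ getV v i j = false then
      if limit < count + 1 then none
      else
        let p := recA B rows cols i j v
        if p.1 < minimum then none
        else loopJA B rows cols minimum limit i rest (count + 1) p.2
    else loopJA B rows cols minimum limit i rest count v

-- outer 'for i in range(rows)' of A
def loopIA (B : List (List Int)) (rows cols minimum limit : Int) :
    List Int → Int → List (List Bool) → Bool
  | [], _, _ => true
  | i :: rest, count, v =>
    match loopJA B rows cols minimum limit i (PySem.List.pyRange 0 cols 1) count v with
    | none => false
    | some (c, v') => loopIA B rows cols minimum limit rest c v'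

def connexity_check (B : List (List Int)) (autres_pi_ces : List (List Int)) (aires_autres_pieces : List Int) : Bool :=
  let rows : Int := B.length
  let cols : Int := (B.headD []).length
  let visite := List.replicate B.length (List.replicate (B.headD []).length false)
  let minimum : Int := (PySem.List.min? aires_autres_pieces (fun x => x)).getD 0
  loopIA B rows cols minimum autres_pi_ces.length (PySem.List.pyRange 0 rows 1) 0 visite

-- ===== PORT B =====

-- iterative flood fill: explicit stack of cells, pop / test / mark / push neighbours
def fillLoop (B : List (List Int)) (rows cols : Int) :
    List (Int × Int) → List (List Bool) → Int → Int × List (List Bool)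
  | [], v, area => (area, v)
  | (x, y) :: rest, v, area =>
    if h : x < 0 ∨ y < 0 ∨ rows ≤ x ∨ cols ≤ y ∨ cellB B x y = 1 ∨ getV v x y = true then
      fillLoop B rows cols rest v area
    else
      fillLoop B rows cols ((x + 1, y) :: (x - 1, y) :: (x, y + 1) :: (x, y - 1) :: rest)
        (setV v x y) (area + 1)
termination_by stack v _ => (unvis v, stack.length)
decreasing_by
  · exact Prod.Lex.right _ (by simp)
  · exact Prod.Lex.left _ _ (setV_lt v x y (by
      push_neg at h
      exact Bool.not_eq_true _ ▸ (by simpa using h.2.2.2.2.2)))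

def fillB (B : List (List Int)) (rows cols : Int) (sx sy : Int) (v : List (List Bool)) :
    Int × List (List Bool) :=
  fillLoop B rows cols [(sx, sy)] v 0

-- inner loop of B (identical scan, but the area comes from the iterative fill)
def loopJB (B : List (List Int)) (rows cols minimum limit : Int) (i : Int) :
    List Int → Int → List (List Bool) → Option (Int × List (List Bool))
  | [], count, v => some (count, v)
  | j :: rest, count, v =>
    if cellB B i j = 0 ∧ getV v i j = false then
      if limit < count + 1 then none
      else
        let p := fillB B rows cols i j v
        if p.1 < minimum then none
        else loopJB B rows cols minimum limit i rest (count + 1) p.2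
    else loopJB B rows cols minimum limit i rest count v

def loopIB (B : List (List Int)) (rows cols minimum limit : Int) :
    List Int → Int → List (List Bool) → Bool
  | [], _, _ => true
  | i :: rest, count, v =>
    match loopJB B rows cols minimum limit i (PySem.List.pyRange 0 cols 1) count v with
    | none => false
    | some (c, v') => loopIB B rows cols minimum limit rest c v'

def connexity_check_alt (B : List (List Int)) (autres_pi_ces : List (List Int)) (aires_autres_pieces : List Int) : Bool :=
  let rows : Int := B.length
  let cols : Int := (B.headD []).length
  let visite := List.replicate B.length (List.replicate (B.headD []).length false)
  let minimum : Int := (PySem.List.min? aires_autres_pieces (fun x => x)).getD 0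
  loopIB B rows cols minimum autres_pi_ces.length (PySem.List.pyRange 0 rows 1) 0 visite

-- ===== PRECONDITION & SPEC =====
-- Pre_ excludes inputs where A raises: empty B (len(B[0]) → IndexError), empty
-- aires_autres_pieces (min() → ValueError), and ragged B whose first row is longer than some
-- other row (B[x][y] → IndexError whenever such a row is scanned; A can still return False
-- early on a few such inputs, which this closed-form shape condition also excludes).
def Pre_connexity_check (B : List (List Int)) (autres_pi_ces : List (List Int)) (aires_autres_pieces : List Int) : Prop :=
  B ≠ [] ∧ aires_autres_pieces ≠ [] ∧ ∀ row ∈ B, (B.headD []).length ≤ row.length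
instance (B : List (List Int)) (autres_pi_ces : List (List Int)) (aires_autres_pieces : List Int) : Decidable (Pre_connexity_check B autres_pi_ces aires_autres_pieces) := by unfold Pre_connexity_check; infer_instance

def pvWitness_connexity_check : List (List Int) × List (List Int) × List Int :=
  ([[0, 1], [1, 0]], [[1]], [1, 2])

def Spec_connexity_check (B : List (List Int)) (autres_pi_ces : List (List Int)) (aires_autres_pieces : List Int) (out : Bool) : Prop := out = connexity_check_alt B autres_pi_ces aires_autres_pieces
instance (B : List (List Int)) (autres_pi_ces : List (List Int)) (aires_autres_pieces : List Int) (out : Bool) : Decidable (Spec_connexity_check B autres_pi_ces aires_autres_pieces out) := by unfold Spec_connexity_check; infer_instance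

-- ===== CLAIM (what is proved, stated in full; the proofs are below) =====
def Claim_equal_connexity_check : Prop := ∀ (B : List (List Int)) (autres_pi_ces : List (List Int)) (aires_autres_pieces : List Int), Dom_connexity_check B autres_pi_ces aires_autres_pieces → Pre_connexity_check B autres_pi_ces aires_autres_pieces → Spec_connexity_check B autres_pi_ces aires_autres_pieces (connexity_check B autres_pi_ces aires_autres_pieces)

-- ===== LEMMAS AND PROOFS =====

-- setV never decreases the visited count
theorem setRow_count_le (r : List Bool) (y : Nat) :
    (setRow r y).count false ≤ r.count false := by
  induction r generalizing y with
  | nil => simp [setRow]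
  | cons b t ih =>
    cases y with
    | zero => cases b <;> simp [setRow]
    | succ n => have := ih n; simp [setRow, List.count_cons]; omega

theorem setV2_le (v : List (List Bool)) (x y : Nat) :
    unvis (setV.setV2 v x y) ≤ unvis v := by
  induction v generalizing x with
  | nil => simp [setV.setV2]
  | cons r t ih =>
    cases x with
    | zero =>
      have := setRow_count_le r y
      simp [setV.setV2, unvis]; omega
    | succ n =>
      have := ih n
      simp [setV.setV2, unvis] at this ⊢; omega

theorem setV_le (v : List (List Bool)) (x y : Int) :
    unvis (setV v x y) ≤ unvis v := by
  rw [setV_eq_setV2]; exact setV2_le v x.toNat y.toNat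

-- the recursive fill never decreases the visited count
theorem recF_mono (B : List (List Int)) (rows cols : Int) :
    ∀ (f : Nat) (x y : Int) (v : List (List Bool)),
      unvis (recF B rows cols f x y v).2 ≤ unvis v := by
  intro f
  induction f with
  | zero => intro x y v; simp [recF]
  | succ g ih =>
    intro x y v
    rw [recF]
    split
    · simp
    · exact le_trans (ih _ _ _) (le_trans (ih _ _ _)
        (le_trans (ih _ _ _) (le_trans (ih _ _ _) (setV_le v x y))))

-- a fully visited matrix reads true everywhere
theorem getV_of_unvis_zero (v : List (List Bool)) (x y : Int) (h : unvis v = 0) :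
    getV v x y = true := by
  unfold getV
  cases hr : (v.getD x.toNat []) with
  | nil => simp [List.getD]
  | cons b t =>
    have hmem : (b :: t) ∈ v := by
      unfold List.getD at hr
      cases hv : v[x.toNat]? with
      | none => simp [hv] at hr
      | some r =>
        have := List.mem_of_getElem? hv
        simp [hv] at hr; exact hr ▸ this
    have hcount : (b :: t).count false = 0 := by
      have : (b :: t).count false ≤ (v.map (fun r => r.count false)).sum :=
        List.le_sum_of_mem (List.mem_map_of_mem hmem)
      unfold unvis at h; omega
    have hf : false ∉ (b :: t) := by
      intro hm
      have := List.count_pos_iff.mpr hm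
      omega
    unfold List.getD
    cases he : (b :: t)[y.toNat]? with
    | none => simp
    | some c =>
      have : c ∈ (b :: t) := List.mem_of_getElem? he
      cases c with
      | false => exact absurd this hf
      | true => simp

-- one stack step of the iterative fill equals one recursive call of A's rec
theorem fill_recF (B : List (List Int)) (rows cols : Int) :
    ∀ (f : Nat) (v : List (List Bool)), unvis v ≤ f →
      ∀ (x y : Int) (stack : List (Int × Int)) (area : Int),
        fillLoop B rows cols ((x, y) :: stack) v area
          = fillLoop B rows cols stack (recF B rows cols (f + 1) x y v).2
              (area + (recF B rows cols (f + 1) x y v).1) := by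
  intro f
  induction f with
  | zero =>
    intro v hv x y stack area
    have hz : unvis v = 0 := Nat.le_zero.mp hv
    have hc : x < 0 ∨ y < 0 ∨ rows ≤ x ∨ cols ≤ y ∨ cellB B x y = 1 ∨ getV v x y = true :=
      Or.inr (Or.inr (Or.inr (Or.inr (Or.inr (getV_of_unvis_zero v x y hz)))))
    rw [fillLoop, recF, dif_pos hc, if_pos hc]
    simp
  | succ g ih =>
    intro v hv x y stack area
    by_cases hc : x < 0 ∨ y < 0 ∨ rows ≤ x ∨ cols ≤ y ∨ cellB B x y = 1 ∨ getV v x y = true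
    · rw [fillLoop, recF, dif_pos hc, if_pos hc]
      simp
    · have hg : getV v x y = false := by
        push_neg at hc
        exact Bool.not_eq_true _ ▸ (by simpa using hc.2.2.2.2.2)
      have h0 : unvis (setV v x y) ≤ g := by
        have := setV_lt v x y hg; omega
      rw [fillLoop, recF, dif_neg hc, if_neg hc]
      simp only []
      rw [ih (setV v x y) h0 (x + 1) y]
      rw [ih _ (le_trans (recF_mono B rows cols _ _ _ _) h0) (x - 1) y]
      rw [ih _ (le_trans (recF_mono B rows cols _ _ _ _)
            (le_trans (recF_mono B rows cols _ _ _ _) h0)) x (y + 1)]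
      rw [ih _ (le_trans (recF_mono B rows cols _ _ _ _)
            (le_trans (recF_mono B rows cols _ _ _ _)
              (le_trans (recF_mono B rows cols _ _ _ _) h0))) x (y - 1)]
      congr 1
      ring

theorem fillB_eq_recA (B : List (List Int)) (rows cols x y : Int) (v : List (List Bool)) :
    fillB B rows cols x y v = recA B rows cols x y v := by
  unfold fillB recA
  rw [fill_recF B rows cols (unvis v) v (le_refl _) x y [] 0]
  rw [fillLoop]
  simp

theorem loopJ_eq (B : List (List Int)) (rows cols minimum limit i : Int) :
    ∀ (js : List Int) (count : Int) (v : List (List Bool)),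
      loopJB B rows cols minimum limit i js count v
        = loopJA B rows cols minimum limit i js count v := by
  intro js
  induction js with
  | nil => intro count v; rfl
  | cons j rest ih =>
    intro count v
    simp only [loopJA, loopJB, fillB_eq_recA, ih]

theorem loopI_eq (B : List (List Int)) (rows cols minimum limit : Int) :
    ∀ (is : List Int) (count : Int) (v : List (List Bool)),
      loopIB B rows cols minimum limit is count v
        = loopIA B rows cols minimum limit is count v := by
  intro is
  induction is with
  | nil => intro count v; rfl
  | cons i rest ih =>
    intro count v
    simp only [loopIA, loopIB, loopJ_eq]
    cases loopJA B rows cols minimum limit i (PySem.List.pyRange 0 cols 1) count v with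
    | none => rfl
    | some p => exact ih p.1 p.2

-- ===== VERDICT (by name: the statement is the Claim_ definition above) =====
theorem connexity_check_spec : Claim_equal_connexity_check := by
  intro B autres aires _ _
  unfold Spec_connexity_check connexity_check connexity_check_alt
  exact (loopI_eq B _ _ _ _ _ _ _).symm
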